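-- pv_equiv track=rewrite | github.com/craigbalding/safeyolo | cli/src/safeyolo/commands/setup.py | _insert_nat_anchor
-- ===== SOURCE A (Python) =====
-- def _is_translation_rule(line: str) -> bool:
--     """True for pf translation-class rules (nat-anchor, rdr-anchor, nat, rdr, binat)."""
--     s = line.strip()
--     return s.startswith(("nat-anchor ", "rdr-anchor ", "nat ", "rdr ", "binat "))
--
-- def _is_filter_anchor(line: str) -> bool:
--     """True for pf filter-class anchor lines (not nat-anchor/rdr-anchor/etc)."""
--     s = line.strip()
--     return s.startswith('anchor "')
--
-- def _insert_nat_anchor(lines: list[str], nat_line: str) -> list[str]: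
--     """Insert nat-anchor in the translation section of pf.conf lines.
--
--     pf requires strict ordering: normalization → translation → filtering.
--     We insert after the last existing translation rule (nat-anchor, rdr-anchor,
--     etc). If none exists, we insert before the first filter anchor.
--     """
--     result = list(lines)
--     last_translation_idx = -1
--     first_filter_idx = None
--
--     for i, raw in enumerate(result):
--         stripped = raw.strip()
--         if not stripped or stripped.startswith("#"):
--             continue
--         if _is_translation_rule(stripped):
--             last_translation_idx = i
--         elif first_filter_idx is None and _is_filter_anchor(stripped):
--             first_filter_idx = i
--
--     if last_translation_idx >= 0:
--         insert_idx = last_translation_idx + 1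
--     elif first_filter_idx is not None:
--         insert_idx = first_filter_idx
--     else:
--         insert_idx = len(result)
--
--     result.insert(insert_idx, nat_line + "\n")
--     return result
-- ===== SOURCE B (Python) =====
-- def _is_translation_rule(line: str) -> bool:
--     s = line.strip()
--     return s.startswith(("nat-anchor ", "rdr-anchor ", "nat ", "rdr ", "binat "))
--
-- def _is_filter_anchor(line: str) -> bool:
--     s = line.strip()
--     return s.startswith('anchor "')
--
-- def _insert_nat_anchor(lines: list[str], nat_line: str) -> list[str]:
--     """Insert nat-anchor: scan backwards for the last translation rule and
--     insert right after it; failing that, insert before the first filter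
--     anchor; failing that, append at the end."""
--     insert_idx = None
--     for i, raw in reversed(list(enumerate(lines))):
--         stripped = raw.strip()
--         if stripped and not stripped.startswith("#") and _is_translation_rule(stripped):
--             insert_idx = i + 1
--             break
--     if insert_idx is None:
--         insert_idx = len(lines)
--         for i, raw in enumerate(lines):
--             if _is_filter_anchor(raw.strip()):
--                 insert_idx = i
--                 break
--     return lines[:insert_idx] + [nat_line + "\n"] + lines[insert_idx:]
-- ===== Notes on version B (the rewrite author's own statement) =====
-- stated objective: alternative
-- what changed: Replaces A's single forward pass that maintains two accumulators (last translation index and first filter-anchor index) by an early-exit backward scan that finds the last translation rule directly, with a separate forward scan for the first filter anchor only when no translation rule exists, and builds the result by slicing instead of in-place insert.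
import Mathlib
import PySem

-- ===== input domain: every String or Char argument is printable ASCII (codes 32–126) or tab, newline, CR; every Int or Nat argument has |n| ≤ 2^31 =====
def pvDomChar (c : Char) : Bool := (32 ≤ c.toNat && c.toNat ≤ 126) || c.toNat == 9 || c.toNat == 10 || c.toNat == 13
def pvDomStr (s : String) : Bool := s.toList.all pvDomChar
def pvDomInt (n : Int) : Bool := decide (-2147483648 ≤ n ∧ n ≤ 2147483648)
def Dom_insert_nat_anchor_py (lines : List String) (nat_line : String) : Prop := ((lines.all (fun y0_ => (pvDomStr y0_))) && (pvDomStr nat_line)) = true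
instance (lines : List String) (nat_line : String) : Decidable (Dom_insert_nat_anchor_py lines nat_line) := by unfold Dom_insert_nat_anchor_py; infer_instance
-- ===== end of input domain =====

-- B replaces A's single forward pass with two accumulators by an early-exit backward scan
-- (plus a forward scan only in the fallback case) and slice-concatenation; alternative decomposition, same cost.

-- ===== PORT A =====
-- shared module helpers (used by both Pythons)
def isTranslationRule (line : String) : Bool :=
  let s := PySem.Str.strip line
  PySem.Str.startswith s "nat-anchor " || PySem.Str.startswith s "rdr-anchor " ||
    PySem.Str.startswith s "nat " || PySem.Str.startswith s "rdr " || PySem.Str.startswith s "binat "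

def isFilterAnchor (line : String) : Bool :=
  PySem.Str.startswith (PySem.Str.strip line) "anchor \""

def insert_nat_anchor_py (lines : List String) (nat_line : String) : List String :=
  let result := lines
  let st :=
    (PySem.List.enumerate result 0).foldl
      (fun (acc : Int × Option Int) (p : Int × String) =>
        let stripped := PySem.Str.strip p.2
        if stripped = "" ∨ PySem.Str.startswith stripped "#" then acc
        else if isTranslationRule stripped then (p.1, acc.2)
        else if acc.2.isNone && isFilterAnchor stripped then (acc.1, some p.1)
        else acc)
      ((-1 : Int), (none : Option Int))
  let insert_idx : Int :=
    if st.1 ≥ 0 then st.1 + 1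
    else
      match st.2 with
      | some j => j
      | none => (result.length : Int)
  PySem.List.insert result insert_idx (nat_line ++ "\n")

-- ===== PORT B =====
def insert_nat_anchor_py_alt (lines : List String) (nat_line : String) : List String :=
  let found : Option Int :=
    ((PySem.List.enumerate lines 0).reverse.find? (fun p =>
        let stripped := PySem.Str.strip p.2
        !decide (stripped = "") && !PySem.Str.startswith stripped "#" && isTranslationRule stripped)).map
      (fun p => p.1 + 1)
  let insert_idx : Int :=
    match found with
    | some k => k
    | none =>
      match (PySem.List.enumerate lines 0).find? (fun p => isFilterAnchor (PySem.Str.strip p.2)) with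
      | some q => q.1
      | none => (lines.length : Int)
  PySem.List.slice lines none (some insert_idx) ++ [nat_line ++ "\n"] ++
    PySem.List.slice lines (some insert_idx) none

-- ===== PRECONDITION & SPEC =====
def Spec_insert_nat_anchor_py (lines : List String) (nat_line : String) (out : List String) : Prop := out = insert_nat_anchor_py_alt lines nat_line
instance (lines : List String) (nat_line : String) (out : List String) : Decidable (Spec_insert_nat_anchor_py lines nat_line out) := by unfold Spec_insert_nat_anchor_py; infer_instance

-- ===== CLAIM (what is proved, stated in full; the proofs are below) =====
def Claim_equal_insert_nat_anchor_py : Prop := ∀ (lines : List String) (nat_line : String), Dom_insert_nat_anchor_py lines nat_line → Spec_insert_nat_anchor_py lines nat_line (insert_nat_anchor_py lines nat_line)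

-- ===== LEMMAS AND PROOFS =====

-- the per-line tests, named for the proofs
def qT : Int × String → Bool := fun p =>
  let stripped := PySem.Str.strip p.2
  !decide (stripped = "") && !PySem.Str.startswith stripped "#" && isTranslationRule stripped

def qF : Int × String → Bool := fun p => isFilterAnchor (PySem.Str.strip p.2)

def qFa : Int × String → Bool := fun p =>
  let stripped := PySem.Str.strip p.2
  !decide (stripped = "") && !PySem.Str.startswith stripped "#" &&
    !isTranslationRule stripped && isFilterAnchor stripped

-- a prefix of a dropWhile-result still has a head that fails the test
theorem dropWhile_of_prefix_dropWhile (p : Char → Bool) (l u : List Char)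
    (h : u <+: l.dropWhile p) : u.dropWhile p = u := by
  match u, h with
  | [], _ => simp
  | c :: u', h =>
    have hc : ¬ p c = true := by
      obtain ⟨t, ht⟩ := h
      have hh := List.head?_dropWhile_not p l
      rw [← ht] at hh
      simp at hh
      exact fun hpc => by simp [hpc] at hh
    simp [hc]

theorem chars_rstrip_prefix (t : List Char) : PySem.Chars.rstrip t <+: t := by
  have h : List.dropWhile PySem.Chars.isspace t.reverse <:+ t.reverse :=
    List.dropWhile_suffix _
  have := List.reverse_prefix (l₁ := List.dropWhile PySem.Chars.isspace t.reverse) (l₂ := t.reverse)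
  simp [PySem.Chars.rstrip]
  simpa using this.mpr h

theorem chars_strip_strip (s : List Char) :
    PySem.Chars.strip (PySem.Chars.strip s) = PySem.Chars.strip s := by
  simp only [PySem.Chars.strip, PySem.Chars.lstrip, PySem.Chars.rstrip]
  have h1 : List.dropWhile PySem.Chars.isspace
      ((List.dropWhile PySem.Chars.isspace ((List.dropWhile PySem.Chars.isspace s).reverse)).reverse)
      = (List.dropWhile PySem.Chars.isspace ((List.dropWhile PySem.Chars.isspace s).reverse)).reverse := by
    apply dropWhile_of_prefix_dropWhile PySem.Chars.isspace s
    exact chars_rstrip_prefix (List.dropWhile PySem.Chars.isspace s)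
  rw [h1]
  simp [List.dropWhile_idempotent]

theorem prefix_head_eq {a b : Char} {u v s : List Char}
    (h1 : (a :: u) <+: s) (h2 : (b :: v) <+: s) : a = b := by
  obtain ⟨t1, rfl⟩ := h1
  obtain ⟨t2, ht⟩ := h2
  simpa using (congrArg List.head? ht).symm

-- a filter-anchor line is non-blank, not a comment and not a translation rule
theorem filter_anchor_props (raw : String) (h : isFilterAnchor (PySem.Str.strip raw) = true) :
    decide (PySem.Str.strip raw = "") = false ∧
    PySem.Chars.startswith (PySem.Chars.strip raw.toList) ['#'] = false ∧
    isTranslationRule (PySem.Str.strip raw) = false := by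
  have hA : PySem.Chars.startswith (PySem.Chars.strip raw.toList)
      ['a', 'n', 'c', 'h', 'o', 'r', ' ', '\"'] = true := by
    have h' := h
    simp [isFilterAnchor] at h'
    rw [chars_strip_strip] at h'
    exact h'
  have hpre : ('a' :: ['n', 'c', 'h', 'o', 'r', ' ', '\"']) <+: PySem.Chars.strip raw.toList :=
    (PySem.Chars.startswith_iff _ _).mp hA
  refine ⟨?_, ?_, ?_⟩
  · simp only [decide_eq_false_iff_not]
    intro he
    have hnil : PySem.Chars.strip raw.toList = [] := by
      have hS : (PySem.Str.strip raw).toList = PySem.Chars.strip raw.toList := by simp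
      rw [he] at hS
      simpa using hS.symm
    rw [hnil] at hpre
    simpa using hpre.length_le
  · by_contra hc
    simp only [Bool.not_eq_false] at hc
    have : ('#' :: ([] : List Char)) <+: PySem.Chars.strip raw.toList :=
      (PySem.Chars.startswith_iff _ _).mp hc
    exact absurd (prefix_head_eq this hpre) (by decide)
  · by_contra hc
    simp only [Bool.not_eq_false] at hc
    simp [isTranslationRule] at hc
    rw [chars_strip_strip] at hc
    rcases hc with ((((hc | hc) | hc) | hc) | hc) <;>
      exact absurd (prefix_head_eq ((PySem.Chars.startswith_iff _ _).mp hc) hpre) (by decide)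

theorem qFa_eq_qF : qFa = qF := by
  funext p
  simp only [qFa, qF]
  by_cases h : isFilterAnchor (PySem.Str.strip p.2) = true
  · obtain ⟨h1, h2, h3⟩ := filter_anchor_props p.2 h
    simp [h, h1, h2, h3]
  · simp [Bool.not_eq_true] at h
    simp [h]

-- the A-loop body is a pair of independent updates
theorem a_body_eq :
    (fun (acc : Int × Option Int) (p : Int × String) =>
        let stripped := PySem.Str.strip p.2
        if stripped = "" ∨ PySem.Str.startswith stripped "#" then acc
        else if isTranslationRule stripped then (p.1, acc.2)
        else if acc.2.isNone && isFilterAnchor stripped then (acc.1, some p.1)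
        else acc)
      = fun (s : Int × Option Int) (p : Int × String) =>
        (if qT p then p.1 else s.1, if s.2.isNone && qFa p then some p.1 else s.2) := by
  funext acc p
  obtain ⟨a, b⟩ := acc
  simp only [qT, qFa]
  by_cases h1 : PySem.Str.strip p.2 = "" <;>
    by_cases h2 : PySem.Chars.startswith (PySem.Chars.strip p.2.toList) ['#'] = true <;>
    by_cases h3 : isTranslationRule (PySem.Str.strip p.2) = true <;>
    by_cases h4 : isFilterAnchor (PySem.Str.strip p.2) = true <;>
    cases b <;> simp [h1, h2, h3, h4]

-- 'keep the last index matching q' as a fold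
theorem foldl_last_idx {α : Type} (q : α → Bool) (m : α → Int) :
    ∀ (l : List α) (a0 : Int),
      l.foldl (fun a x => if q x then m x else a) a0 = ((l.reverse.find? q).map m).getD a0 := by
  intro l
  induction l with
  | nil => intro a0; rfl
  | cons x l ih =>
    intro a0
    rw [List.foldl_cons, ih, List.reverse_cons, List.find?_append]
    cases hf : l.reverse.find? q with
    | some y => simp
    | none =>
      cases hx : q x <;> simp [List.find?, hx]

-- 'keep the first index matching q' as a fold
theorem foldl_first_idx {α β : Type} (q : α → Bool) (m : α → β) :
    ∀ (l : List α) (b0 : Option β),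
      l.foldl (fun b x => if b.isNone && q x then some (m x) else b) b0
        = b0.or ((l.find? q).map m) := by
  intro l
  induction l with
  | nil => intro b0; cases b0 <;> rfl
  | cons x l ih =>
    intro b0
    cases b0 with
    | some c => rw [List.foldl_cons]; simp only [Option.isNone_some, Bool.false_and]; rw [ih]; simp
    | none =>
      rw [List.foldl_cons]
      cases hx : q x <;>
        simp only [Option.isNone_none, Bool.true_and] <;>
        rw [ih] <;> simp [List.find?, hx]

theorem mem_enum_bounds {lines : List String} {p : Int × String}
    (h : p ∈ PySem.List.enumerate lines 0) : 0 ≤ p.1 ∧ p.1 + 1 ≤ (lines.length : Int) := by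
  rw [PySem.List.mem_enumerate_iff] at h
  obtain ⟨k, hk, rfl⟩ := h
  refine ⟨by simp, by simp; omega⟩

theorem insert_eq_slices (lines : List String) (v : String) (i : Int)
    (h0 : 0 ≤ i) (h1 : i ≤ (lines.length : Int)) :
    PySem.List.insert lines i v =
      PySem.List.slice lines none (some i) ++ [v] ++ PySem.List.slice lines (some i) none := by
  rw [PySem.List.slice_to _ h0, PySem.List.slice_from _ h0]
  have hn : i.toNat ≤ lines.length := by omega
  have := PySem.List.insert_natCast lines i.toNat v hn
  rw [Int.toNat_of_nonneg h0] at this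
  rw [this]
  simp

-- ===== VERDICT (by name: the statement is the Claim_ definition above) =====
theorem insert_nat_anchor_py_spec : Claim_equal_insert_nat_anchor_py := by
  intro lines nat_line _
  unfold Spec_insert_nat_anchor_py
  simp only [insert_nat_anchor_py, insert_nat_anchor_py_alt]
  rw [a_body_eq,
    PySem.List.foldl_prod_mk (f := fun a p => if qT p then p.1 else a)
      (g := fun b p => if b.isNone && qFa p then some p.1 else b),
    foldl_last_idx, foldl_first_idx, qFa_eq_qF]
  have hqT : (fun (p : Int × String) =>
      let stripped := PySem.Str.strip p.2
      !decide (stripped = "") && !PySem.Str.startswith stripped "#" && isTranslationRule stripped) = qT := rfl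
  have hqF : (fun (p : Int × String) => isFilterAnchor (PySem.Str.strip p.2)) = qF := rfl
  rw [hqT, hqF]
  cases hT : (PySem.List.enumerate lines 0).reverse.find? qT with
  | some p =>
    have hb := mem_enum_bounds (List.mem_reverse.mp (List.mem_of_find?_eq_some hT))
    have hge : p.1 ≥ 0 := hb.1
    simp only [Option.map_some, Option.getD_some, hge, if_true]
    rw [insert_eq_slices lines (nat_line ++ "\n") (p.1 + 1) (by omega) hb.2]
  | none =>
    simp only [Option.map_none, Option.getD_none]
    have : ¬ ((-1 : Int) ≥ 0) := by omega
    simp only [this, if_false]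
    cases hF : (PySem.List.enumerate lines 0).find? qF with
    | some q =>
      have hb := mem_enum_bounds (List.mem_of_find?_eq_some hF)
      simp only [Option.map_some, Option.none_or]
      rw [insert_eq_slices lines (nat_line ++ "\n") q.1 hb.1 (by omega)]
    | none =>
      simp only [Option.map_none, Option.none_or]
      rw [insert_eq_slices lines (nat_line ++ "\n") (lines.length : Int) (by omega) (by omega)]
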